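-- pv_equiv track=rewrite | github.com/tomas-ruiz-249/proyecto-final-logica-2 | groundedPL2/codificacion.py | Ytoria_LaTeX
-- ===== SOURCE A (Python) =====
-- from typing import (
-- 	List, Optional, Tuple
-- )
--
-- def Ytoria_LaTeX(
-- 			lista_forms: List[str],
-- 			left_first: Optional[bool]=True
-- 		) -> str:
-- 	form = ''
-- 	inicial = True
-- 	if left_first:
-- 		lista = lista_forms[::-1]
-- 		backward=False
-- 	else:
-- 		lista = lista_forms
-- 		backward=True
-- 	for f in lista:
-- 		if inicial:
-- 			form = f
-- 			inicial = False
-- 		else: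
-- 			if backward:
-- 				form = '(' + form + r'\wedge' + f + ')'
-- 			else:
-- 				form = '(' + f + r'\wedge' + form + ')'
-- 	return form
-- ===== SOURCE B (Python) =====
-- def Ytoria_LaTeX(lista_forms, left_first=True):
--     n = len(lista_forms)
--     if n == 0:
--         return ''
--     if left_first:
--         return ''.join('(' + f + r'\wedge' for f in lista_forms[:-1]) + lista_forms[-1] + ')' * (n - 1)
--     return '(' * (n - 1) + lista_forms[0] + ''.join(r'\wedge' + f + ')' for f in lista_forms[1:])
-- ===== Notes on version B (the rewrite author's own statement) =====
-- stated objective: faster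
-- what changed: Instead of wrapping the accumulator in parentheses once per loop iteration (after reversing the list in the left_first branch), B emits the whole string in closed form: one block of n-1 opening (or closing) parentheses plus a single join over the connective pieces, with no reversal and no per-step accumulator copying.
import Mathlib
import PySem

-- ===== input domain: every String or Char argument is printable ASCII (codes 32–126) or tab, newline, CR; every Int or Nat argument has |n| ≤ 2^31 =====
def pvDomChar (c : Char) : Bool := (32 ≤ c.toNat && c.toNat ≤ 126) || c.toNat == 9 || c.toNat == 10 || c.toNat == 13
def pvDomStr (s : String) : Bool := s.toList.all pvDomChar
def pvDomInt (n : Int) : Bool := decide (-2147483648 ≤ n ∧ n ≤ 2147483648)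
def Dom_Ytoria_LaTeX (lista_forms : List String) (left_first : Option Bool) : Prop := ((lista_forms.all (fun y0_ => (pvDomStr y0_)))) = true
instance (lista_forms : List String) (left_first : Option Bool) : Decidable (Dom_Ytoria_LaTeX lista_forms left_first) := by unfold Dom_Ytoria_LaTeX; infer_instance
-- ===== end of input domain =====

-- B replaces A's one-element-at-a-time accumulator wrapping by a single closed-form
-- string build (all open/close parentheses emitted in one block), avoiding the per-step
-- re-copy of the accumulator; objective: faster (measured).

-- ===== PORT A =====
-- literal transliteration of A: reverse-or-not, then a left fold carrying (form, inicial);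
-- xs[::-1] is PySem.List.slice? with step -1 (never none, totalised with getD [])
def Ytoria_LaTeX (lista_forms : List String) (left_first : Option Bool) : String :=
  -- `if left_first:` — an Optional[bool] is truthy exactly when it is True
  let p : List String × Bool :=
    if left_first = some true then
      ((PySem.List.slice? lista_forms none none (-1)).getD [], false)
    else
      (lista_forms, true)
  let res := p.1.foldl
    (fun (st : String × Bool) f =>
      if st.2 = true then (f, false)
      else if p.2 = true then ("(" ++ st.1 ++ "\\wedge" ++ f ++ ")", st.2)
      else ("(" ++ f ++ "\\wedge" ++ st.1 ++ ")", st.2))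
    ("", true)
  res.1

-- ===== PORT B =====
-- literal transliteration of Source B; [:-1] = dropLast, [-1] = getLast!, [0] = head!,
-- [1:] = drop 1, ''.join = PySem.Str.join "", ')'*(n-1) = join of (n-1) copies
def Ytoria_LaTeX_alt (lista_forms : List String) (left_first : Option Bool) : String :=
  let n := lista_forms.length
  if n = 0 then ""
  else if left_first = some true then
    PySem.Str.join "" (lista_forms.dropLast.map (fun f => "(" ++ f ++ "\\wedge"))
      ++ lista_forms.getLast! ++ PySem.Str.join "" (List.replicate (n - 1) ")")
  else
    PySem.Str.join "" (List.replicate (n - 1) "(") ++ lista_forms.head!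
      ++ PySem.Str.join "" ((lista_forms.drop 1).map (fun f => "\\wedge" ++ f ++ ")"))

-- ===== PRECONDITION & SPEC =====
def Spec_Ytoria_LaTeX (lista_forms : List String) (left_first : Option Bool) (out : String) : Prop := out = Ytoria_LaTeX_alt lista_forms left_first
instance (lista_forms : List String) (left_first : Option Bool) (out : String) : Decidable (Spec_Ytoria_LaTeX lista_forms left_first out) := by unfold Spec_Ytoria_LaTeX; infer_instance

-- ===== CLAIM (what is proved, stated in full; the proofs are below) =====
def Claim_equal_Ytoria_LaTeX : Prop := ∀ (lista_forms : List String) (left_first : Option Bool), Dom_Ytoria_LaTeX lista_forms left_first → Spec_Ytoria_LaTeX lista_forms left_first (Ytoria_LaTeX lista_forms left_first)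

-- ===== LEMMAS AND PROOFS =====

-- A's fold in the non-truthy (backward) branch, started after the first element:
-- each step wraps the accumulator as '(' ++ acc ++ '\wedge' ++ f ++ ')'
theorem pvBack (rest : List String) (acc : String) :
    rest.foldl
      (fun (st : String × Bool) f =>
        if st.2 = true then (f, false)
        else ("(" ++ st.1 ++ "\\wedge" ++ f ++ ")", st.2))
      (acc, false)
    = (String.ofList (List.replicate rest.length '(' ++ acc.toList
        ++ (rest.map (fun f => "\\wedge".toList ++ f.toList ++ [')'])).flatten), false) := by
  induction rest generalizing acc with
  | nil => simp
  | cons b rest ih =>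
    simp only [List.foldl_cons, Bool.false_eq_true, if_false]
    rw [ih]
    rw [Prod.mk.injEq]
    refine ⟨String.toList_inj.mp ?_, rfl⟩
    simp [List.replicate_succ', List.append_assoc]

-- A's fold in the truthy branch runs over init.reverse and prepends '(' ++ f ++ '\wedge'
theorem pvFwd (init : List String) (acc : String) :
    init.reverse.foldl
      (fun (st : String × Bool) f =>
        if st.2 = true then (f, false)
        else ("(" ++ f ++ "\\wedge" ++ st.1 ++ ")", st.2))
      (acc, false)
    = (String.ofList ((init.map (fun f => '(' :: f.toList ++ "\\wedge".toList)).flatten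
        ++ acc.toList ++ List.replicate init.length ')'), false) := by
  induction init generalizing acc with
  | nil => simp
  | cons a t ih =>
    simp only [List.reverse_cons, List.foldl_append, List.foldl_cons, List.foldl_nil]
    rw [ih]
    simp only [Bool.false_eq_true, if_false]
    rw [Prod.mk.injEq]
    refine ⟨String.toList_inj.mp ?_, rfl⟩
    simp [List.replicate_succ', List.append_assoc]

theorem pvJoinNil : ∀ (ps : List (List Char)), PySem.Chars.join [] ps = ps.flatten
  | [] => rfl
  | [p] => by simp [PySem.Chars.join_singleton]
  | p :: q :: qs => by rw [PySem.Chars.join_cons_cons]; simp [pvJoinNil (q :: qs)]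

theorem pvGetLast! (h : String) (t : List String) :
    (h :: t).getLast! = (h :: t).getLast (by simp) := by
  simp [List.getLast!]

-- ===== VERDICT (by name: the statement is the Claim_ definition above) =====
theorem Ytoria_LaTeX_spec : Claim_equal_Ytoria_LaTeX := by
  intro lista_forms left_first _
  unfold Spec_Ytoria_LaTeX
  cases lista_forms with
  | nil =>
    by_cases hlf : left_first = some true <;>
      simp [Ytoria_LaTeX, Ytoria_LaTeX_alt, hlf, PySem.List.slice?_none_none_neg_one]
  | cons h t =>
    apply String.toList_inj.mp
    by_cases hlf : left_first = some true
    · -- truthy branch: A folds over (h::t).reverse; split off the last element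
      have hne : (h :: t) ≠ [] := by simp
      have hrev : (h :: t).reverse
          = (h :: t).getLast hne :: (h :: t).dropLast.reverse := by
        conv_lhs => rw [← List.dropLast_append_getLast hne]
        simp
      simp only [Ytoria_LaTeX, Ytoria_LaTeX_alt, hlf,
        PySem.List.slice?_none_none_neg_one, Option.getD_some, if_true,
        Bool.false_eq_true, ite_false]
      rw [hrev]
      simp only [List.foldl_cons, ite_true]
      rw [pvFwd]
      rw [pvGetLast! h t]
      simp [pvJoinNil, List.flatten_replicate_singleton, ← List.map_dropLast,
        List.append_assoc]
      congr 1
      congr 1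
      funext f
      simp
    · simp only [Ytoria_LaTeX, Ytoria_LaTeX_alt, hlf, if_false, ite_true]
      simp only [List.foldl_cons, ite_true]
      rw [pvBack]
      simp [pvJoinNil, List.flatten_replicate_singleton, List.append_assoc]
      congr 1
      congr 1
      funext f
      simp
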